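-- pv_equiv track=rewrite | github.com/saymrwulf/NTT-learning | ntt_learning/toy_ntt.py | negacyclic_reduce
-- ===== SOURCE A (Python) =====
-- from typing import Iterable, Sequence
--
-- def _apply_mod(values: Sequence[int], modulus: int | None) -> list[int]:
--     if modulus is None:
--         return [int(value) for value in values]
--     return [int(value) % modulus for value in values]
--
-- def negacyclic_reduce(
--     coefficients: Sequence[int], n: int, modulus: int | None = None
-- ) -> list[int]:
--     """Fold a polynomial back into the ring Z_q[x] / (x^n + 1)."""
--     if n <= 0:
--         raise ValueError("n must be positive")
--
--     reduced = [0] * n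
--     for index, coefficient in enumerate(coefficients):
--         wraps, slot = divmod(index, n)
--         reduced[slot] += coefficient if wraps % 2 == 0 else -coefficient
--     return _apply_mod(reduced, modulus)
-- ===== SOURCE B (Python) =====
-- def _apply_mod(values, modulus):
--     if modulus is None:
--         return [int(value) for value in values]
--     return [int(value) % modulus for value in values]
--
--
-- def negacyclic_reduce(coefficients, n, modulus=None):
--     """Fold a polynomial back into Z_q[x]/(x^n + 1), one block of n coefficients at a time."""
--     if n <= 0:
--         raise ValueError("n must be positive")
--     reduced = [0] * n
--     rest = list(coefficients)
--     sign = 1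
--     while rest:
--         block, rest = rest[:n], rest[n:]
--         for j, coefficient in enumerate(block):
--             reduced[j] += sign * coefficient
--         sign = -sign
--     return _apply_mod(reduced, modulus)
-- ===== Notes on version B (the rewrite author's own statement) =====
-- stated objective: alternative
-- what changed: Replaces the flat per-index divmod pass with a block-wise pass: the coefficient list is consumed in consecutive slices of length n with an alternating per-block sign, so no divmod is computed per element.
import Mathlib
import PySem

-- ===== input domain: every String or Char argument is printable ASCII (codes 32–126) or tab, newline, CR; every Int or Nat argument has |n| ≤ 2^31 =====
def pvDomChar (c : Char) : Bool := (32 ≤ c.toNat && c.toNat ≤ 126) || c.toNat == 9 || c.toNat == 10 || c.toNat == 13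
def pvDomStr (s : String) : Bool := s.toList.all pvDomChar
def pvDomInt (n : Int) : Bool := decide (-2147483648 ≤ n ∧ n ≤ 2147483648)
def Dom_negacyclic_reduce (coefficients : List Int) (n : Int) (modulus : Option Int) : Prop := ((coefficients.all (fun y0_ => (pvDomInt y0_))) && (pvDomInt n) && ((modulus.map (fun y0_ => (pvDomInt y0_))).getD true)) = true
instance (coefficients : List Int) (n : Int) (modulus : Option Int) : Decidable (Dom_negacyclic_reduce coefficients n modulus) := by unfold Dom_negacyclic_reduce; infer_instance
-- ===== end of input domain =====

-- B folds the coefficients block-by-block (consecutive slices of length n with an alternating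
-- per-block sign) instead of A's flat per-index divmod pass; same cost, different decomposition.

-- ===== PORT A =====
-- _apply_mod: int(value) is the identity on ints; value % modulus is Python's % (PySem.Int.mod).
-- modulus == 0 raises ZeroDivisionError in Python: excluded by Pre_.
def pvApplyMod (values : List Int) (modulus : Option Int) : List Int :=
  match modulus with
  | none => values.map (fun v => v)
  | some m => values.map (fun v => PySem.Int.mod v m)

-- n <= 0 raises ValueError in Python (excluded by Pre_); under Pre_ the divmod(index, n) of the
-- loop is total, ported as (floordiv, mod).
def negacyclic_reduce (coefficients : List Int) (n : Int) (modulus : Option Int) : List Int :=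
  let reduced0 : List Int := List.replicate n.toNat 0
  let reduced :=
    (PySem.List.enumerate coefficients 0).foldl
      (fun red p =>
        PySem.List.pySetD red (PySem.Int.mod p.1 n)
          (PySem.List.pyGetD red (PySem.Int.mod p.1 n) 0 +
            (if PySem.Int.mod (PySem.Int.floordiv p.1 n) 2 = 0 then p.2 else -p.2)))
      reduced0
  pvApplyMod reduced modulus

-- ===== PORT B =====
-- the while-loop of Source B: consume `rest` one block rest[:n] at a time (under Pre_, n > 0, so
-- rest[:n] = rest.take n.toNat and rest[n:] = rest.drop n.toNat by PySem.List.slice_to/slice_from);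
-- the `m = 0` disjunct in the guard is only a totality guard (unreachable under Pre_).
def pvBlocks (m : Nat) (red : List Int) (sign : Int) (rest : List Int) : List Int :=
  if h : rest = [] ∨ m = 0 then red
  else
    let block := rest.take m
    let red' :=
      (PySem.List.enumerate block 0).foldl
        (fun r p => PySem.List.pySetD r p.1 (PySem.List.pyGetD r p.1 0 + sign * p.2)) red
    pvBlocks m red' (-sign) (rest.drop m)
termination_by rest.length
decreasing_by
  simp only [not_or] at h
  rcases rest with _ | ⟨x, xs⟩
  · exact absurd rfl h.1
  · simp [List.length_drop]
    omega

-- ValueError branch of Source B for n ≤ 0: excluded by Pre_, the port returns [] there.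
def negacyclic_reduce_alt (coefficients : List Int) (n : Int) (modulus : Option Int) : List Int :=
  if n ≤ 0 then []
  else pvApplyMod (pvBlocks n.toNat (List.replicate n.toNat 0) 1 coefficients) modulus

-- ===== PRECONDITION & SPEC =====
-- Pre_ excludes exactly the inputs where the Python raises: n ≤ 0 (ValueError) and modulus = 0
-- (ZeroDivisionError in `value % modulus`).
def Pre_negacyclic_reduce (coefficients : List Int) (n : Int) (modulus : Option Int) : Prop :=
  0 < n ∧ modulus ≠ some 0
instance (coefficients : List Int) (n : Int) (modulus : Option Int) : Decidable (Pre_negacyclic_reduce coefficients n modulus) := by unfold Pre_negacyclic_reduce; infer_instance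

def pvWitness_negacyclic_reduce : List Int × Int × Option Int := ([1, 2, 3, -4, 5], 2, some 7)

def Spec_negacyclic_reduce (coefficients : List Int) (n : Int) (modulus : Option Int) (out : List Int) : Prop := out = negacyclic_reduce_alt coefficients n modulus
instance (coefficients : List Int) (n : Int) (modulus : Option Int) (out : List Int) : Decidable (Spec_negacyclic_reduce coefficients n modulus out) := by unfold Spec_negacyclic_reduce; infer_instance

-- ===== CLAIM (what is proved, stated in full; the proofs are below) =====
def Claim_equal_negacyclic_reduce : Prop := ∀ (coefficients : List Int) (n : Int) (modulus : Option Int), Dom_negacyclic_reduce coefficients n modulus → Pre_negacyclic_reduce coefficients n modulus → Spec_negacyclic_reduce coefficients n modulus (negacyclic_reduce coefficients n modulus)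

-- ===== LEMMAS AND PROOFS =====

-- One block: A's flat step at absolute indices k*m+j (0 ≤ j, block fits in the first m slots)
-- does exactly B's inner loop at relative indices j with the block's sign.
theorem pv_inner_block (m : Nat) (hm : 0 < m) (k : Nat) (sign : Int)
    (hs : sign = if k % 2 = 0 then 1 else -1) :
    ∀ (block : List Int) (j : Nat) (red : List Int), block.length + j ≤ m →
      (PySem.List.enumerate block ((k * m + j : Nat) : Int)).foldl
        (fun red p =>
          PySem.List.pySetD red (PySem.Int.mod p.1 (m : Int))
            (PySem.List.pyGetD red (PySem.Int.mod p.1 (m : Int)) 0 +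
              (if PySem.Int.mod (PySem.Int.floordiv p.1 (m : Int)) 2 = 0 then p.2 else -p.2))) red
      = (PySem.List.enumerate block ((j : Nat) : Int)).foldl
          (fun r p => PySem.List.pySetD r p.1 (PySem.List.pyGetD r p.1 0 + sign * p.2)) red := by
  intro block
  induction block with
  | nil => intro j red _; simp [PySem.List.enumerate_nil]
  | cons c bl ih =>
    intro j red hle
    have hj : j < m := by simp at hle; omega
    rw [PySem.List.enumerate_cons, PySem.List.enumerate_cons, List.foldl_cons, List.foldl_cons]
    have hmod : PySem.Int.mod ((k * m + j : Nat) : Int) (m : Int) = ((j : Nat) : Int) := by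
      rw [PySem.Int.mod_natCast]
      congr 1
      rw [Nat.add_comm (k * m) j, Nat.add_mul_mod_self_right, Nat.mod_eq_of_lt hj]
    have hdiv : PySem.Int.floordiv ((k * m + j : Nat) : Int) (m : Int) = ((k : Nat) : Int) := by
      rw [PySem.Int.floordiv_natCast]
      congr 1
      rw [Nat.mul_comm k m, Nat.mul_add_div hm, Nat.div_eq_of_lt hj]
      omega
    have hk2 : PySem.Int.mod ((k : Nat) : Int) 2 = ((k % 2 : Nat) : Int) := by
      rw [show (2 : Int) = ((2 : Nat) : Int) from rfl, PySem.Int.mod_natCast]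
    have hsign : (if PySem.Int.mod (PySem.Int.floordiv ((k * m + j : Nat) : Int) (m : Int)) 2 = 0
        then c else -c) = sign * c := by
      rw [hdiv, hk2]
      rcases Nat.mod_two_eq_zero_or_one k with h | h <;> simp [h, hs]
    rw [hmod, hsign]
    have h1 : ((k * m + j : Nat) : Int) + 1 = ((k * m + (j + 1) : Nat) : Int) := by push_cast; ring
    have h2 : ((j : Nat) : Int) + 1 = (((j + 1 : Nat)) : Int) := by push_cast; ring
    rw [h1, h2]
    exact ih (j + 1) _ (by simp at hle ⊢; omega)

-- The whole loop: A's flat enumerate-fold starting at block k equals B's block recursion with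
-- the sign of block k.
theorem pv_blocks_eq (m : Nat) (hm : 0 < m) (cs : List Int) (k : Nat) (red : List Int)
    (sign : Int) (hs : sign = if k % 2 = 0 then 1 else -1) :
    (PySem.List.enumerate cs ((k * m : Nat) : Int)).foldl
      (fun red p =>
        PySem.List.pySetD red (PySem.Int.mod p.1 (m : Int))
          (PySem.List.pyGetD red (PySem.Int.mod p.1 (m : Int)) 0 +
            (if PySem.Int.mod (PySem.Int.floordiv p.1 (m : Int)) 2 = 0 then p.2 else -p.2))) red
    = pvBlocks m red sign cs := by
  by_cases hnil : cs = []
  · subst hnil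
    rw [pvBlocks]
    simp [PySem.List.enumerate_nil]
  · rw [pvBlocks]
    rw [dif_neg (by simp [hnil]; omega)]
    conv_lhs => rw [← List.take_append_drop m cs]
    rw [PySem.List.enumerate_append, List.foldl_append]
    have hinner := pv_inner_block m hm k sign hs (cs.take m) 0 red
        (by simp [List.length_take])
    simp only [Nat.add_zero] at hinner
    rw [hinner]
    simp only [Nat.cast_zero]
    by_cases hlen : m ≤ cs.length
    · have htk : (cs.take m).length = m := by simp [List.length_take]; omega
      have hstart : ((k * m : Nat) : Int) + ((cs.take m).length : Int) = (((k + 1) * m : Nat) : Int) := by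
        rw [htk]; push_cast; ring
      rw [hstart]
      refine pv_blocks_eq m hm (cs.drop m) (k + 1) _ (-sign) ?_
      rcases Nat.mod_two_eq_zero_or_one k with h | h <;> simp [hs, h] <;> omega
    · have hdrop : cs.drop m = [] := by
        rw [List.drop_eq_nil_iff]; omega
      rw [hdrop, pvBlocks]
      simp [PySem.List.enumerate_nil]
termination_by cs.length
decreasing_by
  have : 0 < cs.length := List.length_pos_iff.mpr hnil
  rw [List.length_drop]
  omega

-- ===== VERDICT (by name: the statement is the Claim_ definition above) =====
theorem negacyclic_reduce_spec : Claim_equal_negacyclic_reduce := by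
  intro coefficients n modulus _ hpre
  obtain ⟨hn, _⟩ := hpre
  unfold Spec_negacyclic_reduce negacyclic_reduce negacyclic_reduce_alt
  rw [if_neg (by omega)]
  obtain ⟨m, hm⟩ : ∃ m : Nat, n = (m : Int) := ⟨n.toNat, (Int.toNat_of_nonneg (le_of_lt hn)).symm⟩
  subst hm
  have hmp : 0 < m := by exact_mod_cast hn
  refine congrArg (pvApplyMod · modulus) ?_
  have := pv_blocks_eq m hmp coefficients 0 (List.replicate ((m : Int)).toNat 0) 1 (by simp)
  simpa using this
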